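-- pv_equiv track=rewrite | github.com/rsmolarz/MarketAgent | meta/ensemble_agent.py | aggregate_findings_to_signals
-- ===== SOURCE A (Python) =====
-- from typing import Dict, Any, List
--
-- def aggregate_findings_to_signals(findings: List[Dict]) -> Dict[str, int]:
--     """
--     Convert recent findings to directional signals per agent.
--
--     Rules:
--     - Severity critical/high with bullish indicator -> +1
--     - Severity critical/high with bearish indicator -> -1
--     - Otherwise -> 0
--     """
--     signals = {}
--
--     bullish_keywords = ["momentum", "bullish", "buy", "long", "upside", "support", "breakout"]
--     bearish_keywords = ["correction", "bearish", "sell", "short", "downside", "resistance", "breakdown", "stress", "risk"]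
--
--     for f in findings:
--         agent = f.get("agent") or f.get("agent_name")
--         if not agent:
--             continue
--
--         severity = f.get("severity", "low")
--         if severity not in ["high", "critical"]:
--             if agent not in signals:
--                 signals[agent] = 0
--             continue
--
--         title = (f.get("title") or "").lower()
--         description = (f.get("description") or "").lower()
--         text = title + " " + description
--
--         bullish_score = sum(1 for kw in bullish_keywords if kw in text)
--         bearish_score = sum(1 for kw in bearish_keywords if kw in text)
--
--         if bullish_score > bearish_score:
--             signal = 1
--         elif bearish_score > bullish_score:
--             signal = -1
--         else:
--             signal = 0
--
--         if agent in signals: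
--             signals[agent] += signal
--         else:
--             signals[agent] = signal
--
--     normalized = {}
--     for agent, total in signals.items():
--         if total > 0:
--             normalized[agent] = 1
--         elif total < 0:
--             normalized[agent] = -1
--         else:
--             normalized[agent] = 0
--
--     return normalized
-- ===== SOURCE B (Python) =====
-- from typing import Dict, Any, List
--
-- # Signed keyword table: bullish words weigh +1, bearish words -1.
-- _KEYWORDS = [("momentum", 1), ("bullish", 1), ("buy", 1), ("long", 1),
--              ("upside", 1), ("support", 1), ("breakout", 1),
--              ("correction", -1), ("bearish", -1), ("sell", -1), ("short", -1),
--              ("downside", -1), ("resistance", -1), ("breakdown", -1),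
--              ("stress", -1), ("risk", -1)]
--
--
-- def _agent_of(f):
--     return f.get("agent") or f.get("agent_name")
--
--
-- def _finding_signal(f):
--     """0 unless high/critical; else the sign of the signed keyword-hit sum."""
--     if f.get("severity", "low") not in ("high", "critical"):
--         return 0
--     text = (f.get("title") or "").lower() + " " + (f.get("description") or "").lower()
--     s = sum(w for kw, w in _KEYWORDS if kw in text)
--     return (s > 0) - (s < 0)
--
--
-- def aggregate_findings_to_signals(findings: List[Dict]) -> Dict[str, int]:
--     # Stage 1: ordered list of distinct validly-named agents.
--     agents = []
--     for f in findings: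
--         a = _agent_of(f)
--         if a and a not in agents:
--             agents.append(a)
--     # Stage 2: per agent, a brute-force scan over all findings; sign of the total.
--     return {a: (lambda t: (t > 0) - (t < 0))(
--                 sum(_finding_signal(f) for f in findings if _agent_of(f) == a))
--             for a in agents}
-- ===== Notes on version B (the rewrite author's own statement) =====
-- stated objective: alternative
-- what changed: A makes one pass that accumulates running per-agent totals in a dict (comparing separate bullish and bearish keyword counts per finding) and then normalizes; B first collects the ordered list of distinct agents, then for each agent brute-force rescans all findings, scoring each via one signed keyword table (sum of +1/-1 weights, then sign) and taking the sign of the per-agent sum.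
import Mathlib
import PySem

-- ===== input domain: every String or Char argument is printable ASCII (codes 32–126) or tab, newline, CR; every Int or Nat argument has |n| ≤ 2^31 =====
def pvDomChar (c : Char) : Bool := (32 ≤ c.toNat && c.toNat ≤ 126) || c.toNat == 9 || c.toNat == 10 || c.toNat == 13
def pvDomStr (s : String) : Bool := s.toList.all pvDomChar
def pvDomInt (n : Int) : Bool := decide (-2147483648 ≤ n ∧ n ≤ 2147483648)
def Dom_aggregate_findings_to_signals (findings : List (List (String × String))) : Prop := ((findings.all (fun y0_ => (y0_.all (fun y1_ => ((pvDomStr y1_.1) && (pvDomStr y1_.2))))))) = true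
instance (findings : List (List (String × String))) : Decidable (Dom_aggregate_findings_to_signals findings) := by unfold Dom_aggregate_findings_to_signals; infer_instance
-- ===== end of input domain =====

-- B replaces A's single dict-accumulating pass (running totals, two keyword counts compared
-- per finding, then a normalize pass) by: ordered distinct-agent list, then a per-agent
-- brute-force rescan of all findings scored via one signed keyword table.

-- keyword lists A defines
def pvBullish : List (List Char) :=
  ["momentum".toList, "bullish".toList, "buy".toList, "long".toList, "upside".toList, "support".toList, "breakout".toList]
def pvBearish : List (List Char) :=
  ["correction".toList, "bearish".toList, "sell".toList, "short".toList, "downside".toList, "resistance".toList, "breakdown".toList, "stress".toList, "risk".toList]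

-- f.get(k, d) on a finding dict (each finding is a dict str -> str)
def pvGetD (f : List (String × String)) (k : String) (d : String) : String :=
  (PySem.Dict.mk f).getD k d

-- `s or t` on Optional[str]: keep the value only if truthy (non-empty)
def pvTruthyStr : Option String → Option String
  | some s => if s = "" then none else some s
  | none => none

-- agent = f.get("agent") or f.get("agent_name"); none = the falsy case both programs skip
def pvAgentOf (f : List (String × String)) : Option String :=
  match pvTruthyStr ((PySem.Dict.mk f).get? "agent") with
  | some a => some a
  | none => pvTruthyStr ((PySem.Dict.mk f).get? "agent_name")

-- ===== PORT A =====
-- loop body of A's single pass over findings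
-- (`f.get("title") or ""` equals getD "title" "": the only falsy string is already "")
def pvStepA (signals : PySem.Dict String Int) (f : List (String × String)) : PySem.Dict String Int :=
  match pvAgentOf f with
  | none => signals
  | some agent =>
    let severity := pvGetD f "severity" "low"
    if ¬ (severity = "high" ∨ severity = "critical") then
      (if signals.contains agent then signals else signals.insert agent 0)
    else
      let title := PySem.Chars.lower (pvGetD f "title" "").toList
      let description := PySem.Chars.lower (pvGetD f "description" "").toList
      let text := title ++ [' '] ++ description
      let bullish_score : Nat := pvBullish.countP (fun kw => PySem.Chars.isIn kw text)
      let bearish_score : Nat := pvBearish.countP (fun kw => PySem.Chars.isIn kw text)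
      let signal : Int := if bullish_score > bearish_score then 1
        else if bearish_score > bullish_score then -1 else 0
      if signals.contains agent then signals.insert agent (signals.getD agent 0 + signal)
      else signals.insert agent signal

def aggregate_findings_to_signals (findings : List (List (String × String))) : List (String × Int) :=
  let signals := findings.foldl pvStepA PySem.Dict.empty
  let normalized := signals.items.foldl
    (fun nd p => nd.insert p.1 (if p.2 > 0 then (1 : Int) else if p.2 < 0 then -1 else 0))
    PySem.Dict.empty
  normalized.items

-- ===== PORT B =====
-- _KEYWORDS in Source B: one signed table, bullish +1, bearish -1
def pvKwTable : List (List Char × Int) :=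
  pvBullish.map (fun k => (k, 1)) ++ pvBearish.map (fun k => (k, -1))

-- _finding_signal in Source B
def pvFindingSignalB (f : List (String × String)) : Int :=
  if ¬ (pvGetD f "severity" "low" = "high" ∨ pvGetD f "severity" "low" = "critical") then 0
  else
    let text := PySem.Chars.lower (pvGetD f "title" "").toList ++ [' ']
      ++ PySem.Chars.lower (pvGetD f "description" "").toList
    let s : Int := ((pvKwTable.filter (fun q => PySem.Chars.isIn q.1 text)).map Prod.snd).sum
    (if s > 0 then (1 : Int) else 0) - (if s < 0 then 1 else 0)

-- stage-1 loop body: collect distinct validly-named agents in first-appearance order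
def pvAccAgents (acc : List String) (f : List (String × String)) : List String :=
  match pvAgentOf f with
  | none => acc
  | some a => if a ∈ acc then acc else acc ++ [a]

def aggregate_findings_to_signals_alt (findings : List (List (String × String))) : List (String × Int) :=
  let agents := findings.foldl pvAccAgents []
  agents.map (fun a =>
    let t : Int := ((findings.filter (fun f => pvAgentOf f == some a)).map pvFindingSignalB).sum
    (a, (if t > 0 then (1 : Int) else 0) - (if t < 0 then 1 else 0)))

-- ===== PRECONDITION & SPEC =====
def Spec_aggregate_findings_to_signals (findings : List (List (String × String))) (out : List (String × Int)) : Prop := out = aggregate_findings_to_signals_alt findings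
instance (findings : List (List (String × String))) (out : List (String × Int)) : Decidable (Spec_aggregate_findings_to_signals findings out) := by unfold Spec_aggregate_findings_to_signals; infer_instance

-- ===== CLAIM (what is proved, stated in full; the proofs are below) =====
def Claim_equal_aggregate_findings_to_signals : Prop := ∀ (findings : List (List (String × String))), Dom_aggregate_findings_to_signals findings → Spec_aggregate_findings_to_signals findings (aggregate_findings_to_signals findings)

-- ===== LEMMAS AND PROOFS =====

-- per-agent total over a list of findings (B's inner sum)
def pvTot (fs : List (List (String × String))) (a : String) : Int :=
  ((fs.filter (fun f => pvAgentOf f == some a)).map pvFindingSignalB).sum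

theorem pvTot_nil (a : String) : pvTot [] a = 0 := rfl

theorem pvTot_cons (f : List (String × String)) (t : List (List (String × String))) (a : String) :
    pvTot (f :: t) a = (if pvAgentOf f = some a then pvFindingSignalB f else 0) + pvTot t a := by
  simp only [pvTot, List.filter_cons]
  by_cases h : pvAgentOf f = some a
  · simp [h]
  · simp [h]

-- first-appearance-ordered agents of fs not already in `seen`
def pvNewAgents : List (List (String × String)) → List String → List String
  | [], _ => []
  | f :: t, seen =>
    match pvAgentOf f with
    | none => pvNewAgents t seen
    | some a => if a ∈ seen then pvNewAgents t seen else a :: pvNewAgents t (seen ++ [a])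

theorem pvNewAgents_cons_none (f : List (String × String)) (t : List (List (String × String)))
    (seen : List String) (hb : pvAgentOf f = none) :
    pvNewAgents (f :: t) seen = pvNewAgents t seen := by
  rw [show pvNewAgents (f :: t) seen = (match pvAgentOf f with
    | none => pvNewAgents t seen
    | some a => if a ∈ seen then pvNewAgents t seen else a :: pvNewAgents t (seen ++ [a])) from rfl, hb]

theorem pvNewAgents_cons_some (f : List (String × String)) (t : List (List (String × String)))
    (seen : List String) (a : String) (hb : pvAgentOf f = some a) :
    pvNewAgents (f :: t) seen
      = if a ∈ seen then pvNewAgents t seen else a :: pvNewAgents t (seen ++ [a]) := by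
  rw [show pvNewAgents (f :: t) seen = (match pvAgentOf f with
    | none => pvNewAgents t seen
    | some a => if a ∈ seen then pvNewAgents t seen else a :: pvNewAgents t (seen ++ [a])) from rfl, hb]

theorem pvNewAgents_not_mem : ∀ (fs : List (List (String × String))) (seen : List String)
    (b : String), b ∈ pvNewAgents fs seen → b ∉ seen := by
  intro fs
  induction fs with
  | nil => intro seen b h; cases h
  | cons f t ih =>
    intro seen b h
    unfold pvNewAgents at h
    cases hb : pvAgentOf f with
    | none => rw [hb] at h; dsimp only at h; exact ih seen b h
    | some a =>
      rw [hb] at h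
      dsimp only at h
      by_cases ha : a ∈ seen
      · rw [if_pos ha] at h; exact ih seen b h
      · rw [if_neg ha] at h
        rcases List.mem_cons.mp h with h | h
        · subst h; exact ha
        · intro hbs; exact (ih _ b h) (List.mem_append_left _ hbs)

theorem pvNewAgents_nodup : ∀ (fs : List (List (String × String))) (seen : List String),
    (pvNewAgents fs seen).Nodup := by
  intro fs
  induction fs with
  | nil => intro seen; exact List.nodup_nil
  | cons f t ih =>
    intro seen
    unfold pvNewAgents
    cases pvAgentOf f with
    | none => exact ih seen
    | some a =>
      dsimp only
      by_cases ha : a ∈ seen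
      · rw [if_pos ha]; exact ih seen
      · rw [if_neg ha]
        refine List.nodup_cons.mpr ⟨fun hmem => ?_, ih _⟩
        exact (pvNewAgents_not_mem t (seen ++ [a]) a hmem) (List.mem_append_right _ (List.mem_singleton.mpr rfl))

-- B's stage-1 fold computes seen ++ new agents
theorem pvAcc_eq : ∀ (fs : List (List (String × String))) (acc : List String),
    fs.foldl pvAccAgents acc = acc ++ pvNewAgents fs acc := by
  intro fs
  induction fs with
  | nil => intro acc; simp [pvNewAgents]
  | cons f t ih =>
    intro acc
    simp only [List.foldl_cons]
    unfold pvNewAgents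
    cases hb : pvAgentOf f with
    | none =>
      rw [show pvAccAgents acc f = acc from by simp [pvAccAgents, hb]]
      exact ih acc
    | some a =>
      dsimp only
      by_cases ha : a ∈ acc
      · rw [show pvAccAgents acc f = acc from by simp [pvAccAgents, hb, ha], if_pos ha]
        exact ih acc
      · rw [show pvAccAgents acc f = acc ++ [a] from by simp [pvAccAgents, hb, ha], if_neg ha,
          ih (acc ++ [a]), List.append_assoc]
        rfl

-- the signed-table sum equals bullish count minus bearish count
theorem pv_sum_weighted (c : Int) (text : List Char) : ∀ (L : List (List Char)),
    (((L.map (fun k => (k, c))).filter (fun q => PySem.Chars.isIn q.1 text)).map Prod.snd).sum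
      = (L.countP (fun kw => PySem.Chars.isIn kw text) : Int) * c := by
  intro L
  induction L with
  | nil => simp
  | cons k t ih =>
    simp only [List.map_cons, List.filter_cons, List.countP_cons]
    by_cases h : PySem.Chars.isIn k text
    · simp only [h, if_pos, List.map_cons, List.sum_cons, ih]
      push_cast; ring
    · simp only [h, Bool.false_eq_true, if_false, ih]
      push_cast; ring

theorem pv_table_sum (text : List Char) :
    ((pvKwTable.filter (fun q => PySem.Chars.isIn q.1 text)).map Prod.snd).sum
      = (pvBullish.countP (fun kw => PySem.Chars.isIn kw text) : Int)
        - (pvBearish.countP (fun kw => PySem.Chars.isIn kw text) : Int) := by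
  simp only [pvKwTable, List.filter_append, List.map_append, List.sum_append,
    pv_sum_weighted 1 text pvBullish, pv_sum_weighted (-1) text pvBearish]
  ring

-- B's per-finding signal equals A's inline signal when severity is high/critical
theorem pvSignal_eq_high (f : List (String × String))
    (hs : pvGetD f "severity" "low" = "high" ∨ pvGetD f "severity" "low" = "critical") :
    pvFindingSignalB f =
      (if pvBullish.countP (fun kw => PySem.Chars.isIn kw
            (PySem.Chars.lower (pvGetD f "title" "").toList ++ [' ']
              ++ PySem.Chars.lower (pvGetD f "description" "").toList))
          > pvBearish.countP (fun kw => PySem.Chars.isIn kw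
            (PySem.Chars.lower (pvGetD f "title" "").toList ++ [' ']
              ++ PySem.Chars.lower (pvGetD f "description" "").toList)) then (1 : Int)
       else if pvBearish.countP (fun kw => PySem.Chars.isIn kw
            (PySem.Chars.lower (pvGetD f "title" "").toList ++ [' ']
              ++ PySem.Chars.lower (pvGetD f "description" "").toList))
          > pvBullish.countP (fun kw => PySem.Chars.isIn kw
            (PySem.Chars.lower (pvGetD f "title" "").toList ++ [' ']
              ++ PySem.Chars.lower (pvGetD f "description" "").toList)) then -1 else 0) := by
  unfold pvFindingSignalB
  rw [if_neg (not_not.mpr hs)]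
  simp only [pv_table_sum]
  split_ifs <;> omega

theorem pvSignal_eq_low (f : List (String × String))
    (hs : ¬ (pvGetD f "severity" "low" = "high" ∨ pvGetD f "severity" "low" = "critical")) :
    pvFindingSignalB f = 0 := by
  unfold pvFindingSignalB; rw [if_pos hs]

theorem pv_contains_iff (d : PySem.Dict String Int) (a : String) :
    d.contains a = true ↔ a ∈ d.keys := by
  simp [PySem.Dict.contains, PySem.Dict.keys, List.any_eq_true, List.mem_map, beq_iff_eq]

-- one-step rewrites for A's loop body
theorem pvStepA_none (d : PySem.Dict String Int) (f : List (String × String))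
    (hb : pvAgentOf f = none) : pvStepA d f = d := by
  unfold pvStepA; rw [hb]

theorem pvStepA_some (d : PySem.Dict String Int) (f : List (String × String)) (a : String)
    (hb : pvAgentOf f = some a) :
    pvStepA d f =
      if ¬ (pvGetD f "severity" "low" = "high" ∨ pvGetD f "severity" "low" = "critical") then
        (if d.contains a then d else d.insert a 0)
      else if d.contains a then d.insert a (d.getD a 0 + pvFindingSignalB f)
      else d.insert a (pvFindingSignalB f) := by
  unfold pvStepA
  rw [hb]
  dsimp only
  by_cases hs : ¬ (pvGetD f "severity" "low" = "high" ∨ pvGetD f "severity" "low" = "critical")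
  · rw [if_pos hs, if_pos hs]
  · rw [if_neg hs, if_neg hs, pvSignal_eq_high f (not_not.mp hs)]

-- THE main invariant: A's fold over any totals dict with distinct keys
theorem pvFoldA_items : ∀ (fs : List (List (String × String))) (d : PySem.Dict String Int),
    d.keys.Nodup →
    (fs.foldl pvStepA d).items
      = d.items.map (fun p => (p.1, p.2 + pvTot fs p.1))
        ++ (pvNewAgents fs d.keys).map (fun a => (a, pvTot fs a)) := by
  intro fs
  induction fs with
  | nil =>
    intro d _
    simp [pvNewAgents, pvTot_nil]
  | cons f t ih =>
    intro d hnd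
    simp only [List.foldl_cons]
    cases hb : pvAgentOf f with
    | none =>
      rw [pvStepA_none d f hb, ih d hnd, pvNewAgents_cons_none f t d.keys hb]
      congr 1
      · apply List.map_congr_left; intro p _
        rw [pvTot_cons, if_neg (by rw [hb]; simp), zero_add]
      · apply List.map_congr_left; intro a _
        rw [pvTot_cons, if_neg (by rw [hb]; simp), zero_add]
    | some a =>
      rw [pvStepA_some d f a hb]
      have htc : ∀ b, pvTot (f :: t) b = (if b = a then pvFindingSignalB f else 0) + pvTot t b := by
        intro b; rw [pvTot_cons, hb]
        by_cases h : b = a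
        · simp [h]
        · rw [if_neg h, if_neg (by simp [Ne.symm h])]
      by_cases hc : d.contains a
      · -- agent already present: keys unchanged
        have hak : a ∈ d.keys := (pv_contains_iff d a).mp hc
        have key : ∀ (d1 : PySem.Dict String Int) (s : Int),
            d1.items = d.items.map (fun p => if p.1 = a then (p.1, p.2 + s) else p) →
            s = pvFindingSignalB f →
            (t.foldl pvStepA d1).items
              = d.items.map (fun p => (p.1, p.2 + pvTot (f :: t) p.1))
                ++ (pvNewAgents (f :: t) d.keys).map (fun b => (b, pvTot (f :: t) b)) := by
          intro d1 s hd1 hsv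
          have hk1 : d1.keys = d.keys := by
            simp only [PySem.Dict.keys, hd1, List.map_map]
            apply List.map_congr_left
            intro p _
            by_cases h : p.1 = a <;> simp [h]
          rw [ih d1 (by rw [hk1]; exact hnd), hd1, hk1, List.map_map]
          rw [pvNewAgents_cons_some f t d.keys a hb, if_pos hak]
          congr 1
          · apply List.map_congr_left
            intro p _
            simp only [Function.comp_def]
            by_cases h : p.1 = a
            · simp only [h, if_pos, htc, hsv]; ring_nf
            · simp only [h, ite_false, htc, zero_add]
          · apply List.map_congr_left
            intro b hbm
            have : b ∉ d.keys := pvNewAgents_not_mem t d.keys b hbm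
            have hba : b ≠ a := fun h => this (h ▸ hak)
            rw [htc b, if_neg hba, zero_add]
        by_cases hs : ¬ (pvGetD f "severity" "low" = "high" ∨ pvGetD f "severity" "low" = "critical")
        · rw [if_pos hs, if_pos hc]
          refine key d 0 ?_ (pvSignal_eq_low f hs).symm
          have hid : ∀ p ∈ d.items, (if p.1 = a then (p.1, p.2 + (0 : Int)) else p) = p := by
            intro p _
            by_cases h : p.1 = a
            · simp [← h]
            · simp [h]
          rw [List.map_congr_left hid]
          simp
        · rw [if_neg hs, if_pos hc]
          refine key _ (pvFindingSignalB f) ?_ rfl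
          rw [PySem.Dict.items_insert_of_contains d _ hc]
          apply List.map_congr_left
          intro p hp
          obtain ⟨p1, p2⟩ := p
          by_cases h : p1 = a
          · subst h
            have h2 : d.getD p1 0 = p2 := PySem.Dict.getD_of_mem_items d hp hnd 0
            simp [h2]
          · simp [h]
      · -- fresh agent: items append
        have hc' : d.contains a = false := by simpa using hc
        have hak : a ∉ d.keys := fun h => by rw [(pv_contains_iff d a).mpr h] at hc'; cases hc'
        have hpa : ∀ p ∈ d.items, p.1 ≠ a := by
          intro p hp h
          exact hak (h ▸ List.mem_map_of_mem hp)
        have key : ∀ (s : Int), s = pvFindingSignalB f →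
            (t.foldl pvStepA (d.insert a s)).items
              = d.items.map (fun p => (p.1, p.2 + pvTot (f :: t) p.1))
                ++ (pvNewAgents (f :: t) d.keys).map (fun b => (b, pvTot (f :: t) b)) := by
          intro s hsv
          have hnd1 : (d.insert a s).keys.Nodup := PySem.Dict.nodup_keys_insert d a s hnd
          rw [ih _ hnd1, PySem.Dict.items_insert_of_not_contains d s hc', List.map_append]
          have hk1 : (d.insert a s).keys = d.keys ++ [a] := by
            simp [PySem.Dict.keys, PySem.Dict.items_insert_of_not_contains d s hc']
          rw [hk1]
          rw [pvNewAgents_cons_some f t d.keys a hb, if_neg hak]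
          simp only [List.map_cons]
          rw [List.append_assoc]
          congr 1
          · apply List.map_congr_left
            intro p hp
            rw [htc p.1, if_neg (hpa p hp), zero_add]
          · rw [List.map_nil, List.singleton_append, htc a, if_pos rfl, ← hsv]
            congr 1
            apply List.map_congr_left
            intro b hbm
            have hnb : b ∉ d.keys ++ [a] := pvNewAgents_not_mem t _ b hbm
            have hba : b ≠ a := fun h => hnb (List.mem_append_right _ (by simp [h]))
            rw [htc b, if_neg hba, zero_add]
        by_cases hs : ¬ (pvGetD f "severity" "low" = "high" ∨ pvGetD f "severity" "low" = "critical")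
        · rw [if_pos hs, if_neg hc]
          exact key 0 (pvSignal_eq_low f hs).symm
        · rw [if_neg hs, if_neg hc]
          exact key (pvFindingSignalB f) rfl

-- ===== VERDICT (by name: the statement is the Claim_ definition above) =====
theorem aggregate_findings_to_signals_spec : Claim_equal_aggregate_findings_to_signals := by
  intro findings _
  unfold Spec_aggregate_findings_to_signals aggregate_findings_to_signals aggregate_findings_to_signals_alt
  have hitems : (findings.foldl pvStepA PySem.Dict.empty).items
      = (pvNewAgents findings []).map (fun a => (a, pvTot findings a)) := by
    rw [pvFoldA_items findings PySem.Dict.empty List.nodup_nil]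
    rfl
  have hkeys : ((pvNewAgents findings []).map (fun a => (a, pvTot findings a))).map (fun p => p.1)
      = pvNewAgents findings [] := by
    rw [List.map_map]; exact List.map_id' _
  have hfresh := PySem.Dict.items_foldl_insert_fresh
    ((pvNewAgents findings []).map (fun a => (a, pvTot findings a))) (fun p => p.1)
    (fun p => if p.2 > 0 then (1 : Int) else if p.2 < 0 then -1 else 0)
    PySem.Dict.empty (fun p _ => PySem.Dict.contains_empty _)
    (by rw [hkeys]; exact pvNewAgents_nodup findings [])
  show (List.foldl (fun nd p => nd.insert p.1 (if p.2 > 0 then (1 : Int) else if p.2 < 0 then -1 else 0))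
      PySem.Dict.empty (findings.foldl pvStepA PySem.Dict.empty).items).items = _
  rw [hitems, hfresh, pvAcc_eq findings [], List.nil_append]
  simp only [List.map_map]
  apply List.map_congr_left
  intro a _
  simp only [Function.comp_def, pvTot]
  congr 1
  split_ifs <;> omega
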